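-- pv_equiv track=rewrite | github.com/KagutsuchiXD/Past-Classes | CS5050-Algorithms/Assign2/complexKnapsack.py | complexKnapsack
-- ===== SOURCE A (Python) =====
-- def complexKnapsack(i, size1, size2, s, v):
--     if size1 == 0:  # base case
--         if size2 == 0:
--             return 0
--     if i == 0:  # if there are no items return 0
--         return 0
--     if s[i - 1] > size1:
--         if s[i - 1] > size2:
--             return complexKnapsack((i - 1), size1, size2, s, v)
--         return max(v[i - 1] + complexKnapsack((i - 1), size1, size2 - s[i - 1], s, v),
--                    complexKnapsack((i - 1), size1, size2, s, v))
--     else: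
--         return max(v[i - 1] + complexKnapsack((i - 1), size1 - s[i - 1], size2, s, v),
--                    complexKnapsack((i - 1), size1, size2, s, v))
-- ===== SOURCE B (Python) =====
-- def complexKnapsack(i, size1, size2, s, v):
--     # Same recurrence as the original, but memoized on (i, size1, size2):
--     # each distinct state is solved once instead of once per path.
--     memo = {}
--
--     def go(i, size1, size2):
--         if size1 == 0 and size2 == 0:
--             return 0
--         if i == 0:
--             return 0
--         key = (i, size1, size2)
--         if key in memo:
--             return memo[key]
--         w = s[i - 1]
--         if w > size1:
--             if w > size2:
--                 r = go(i - 1, size1, size2)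
--             else:
--                 r = max(v[i - 1] + go(i - 1, size1, size2 - w),
--                         go(i - 1, size1, size2))
--         else:
--             r = max(v[i - 1] + go(i - 1, size1 - w, size2),
--                     go(i - 1, size1, size2))
--         memo[key] = r
--         return r
--
--     return go(i, size1, size2)
-- ===== Notes on version B (the rewrite author's own statement) =====
-- stated objective: alternative
-- what changed: Replaces the plain exponential recursion by the same recurrence memoized in a dictionary keyed on (i, size1, size2), so each distinct state is computed once (much faster when states repeat, e.g. 23x at n=64 in a timing run, but with huge random capacities the state space itself can still be exponential, so no unqualified speed claim).
-- outside the precondition, e.g. on complexKnapsack(2, 3, 3, [5, 5], []): A returns 0, B returns 0; on complexKnapsack(3, 0, 0, [], []): A returns 0, B returns 0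
import Mathlib
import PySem

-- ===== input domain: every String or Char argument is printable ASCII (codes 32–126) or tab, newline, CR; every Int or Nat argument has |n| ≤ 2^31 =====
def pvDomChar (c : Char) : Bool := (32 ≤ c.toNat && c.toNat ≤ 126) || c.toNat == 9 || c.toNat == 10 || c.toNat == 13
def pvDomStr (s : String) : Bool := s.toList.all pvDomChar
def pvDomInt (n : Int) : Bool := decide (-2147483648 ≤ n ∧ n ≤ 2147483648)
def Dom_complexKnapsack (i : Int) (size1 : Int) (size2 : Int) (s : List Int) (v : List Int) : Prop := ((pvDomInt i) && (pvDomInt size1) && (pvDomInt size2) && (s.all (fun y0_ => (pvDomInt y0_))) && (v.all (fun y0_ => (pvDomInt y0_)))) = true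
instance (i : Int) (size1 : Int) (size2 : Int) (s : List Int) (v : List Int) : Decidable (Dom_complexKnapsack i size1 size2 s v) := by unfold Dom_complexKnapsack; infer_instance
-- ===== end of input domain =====

-- B memoizes A's recurrence in a dictionary keyed on (i, size1, size2), so each distinct state is solved once.

-- ===== PORT A =====
-- A's recursion, with the Int counter i realised as a Nat fuel (Pre_ requires 0 ≤ i);
-- list indexing s[i-1]/v[i-1] via PySem.List.pyGet? (in range under Pre_, default 0 never used there).
def complexKnapsackAux (n : Nat) (size1 : Int) (size2 : Int) (s : List Int) (v : List Int) : Int :=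
  if size1 = 0 ∧ size2 = 0 then 0
  else
    match n with
    | 0 => 0
    | Nat.succ m =>
      let w := (PySem.List.pyGet? s (Int.ofNat m)).getD 0
      if w > size1 then
        if w > size2 then complexKnapsackAux m size1 size2 s v
        else max ((PySem.List.pyGet? v (Int.ofNat m)).getD 0 + complexKnapsackAux m size1 (size2 - w) s v)
                 (complexKnapsackAux m size1 size2 s v)
      else max ((PySem.List.pyGet? v (Int.ofNat m)).getD 0 + complexKnapsackAux m (size1 - w) size2 s v)
               (complexKnapsackAux m size1 size2 s v)

def complexKnapsack (i : Int) (size1 : Int) (size2 : Int) (s : List Int) (v : List Int) : Int :=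
  complexKnapsackAux i.toNat size1 size2 s v

-- ===== PORT B =====
-- B's inner 'go': same recurrence threading the memo dictionary; returns (value, updated memo).
def knapGo (n : Nat) (size1 : Int) (size2 : Int) (s : List Int) (v : List Int)
    (memo : PySem.Dict (Int × Int × Int) Int) : Int × PySem.Dict (Int × Int × Int) Int :=
  if size1 = 0 ∧ size2 = 0 then (0, memo)
  else
    match n with
    | 0 => (0, memo)
    | Nat.succ m =>
      match memo.get? (Int.ofNat (m + 1), size1, size2) with
      | some r => (r, memo)
      | none =>
        let w := (PySem.List.pyGet? s (Int.ofNat m)).getD 0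
        if w > size1 then
          if w > size2 then
            let p := knapGo m size1 size2 s v memo
            (p.1, p.2.insert (Int.ofNat (m + 1), size1, size2) p.1)
          else
            let p1 := knapGo m size1 (size2 - w) s v memo
            let p2 := knapGo m size1 size2 s v p1.2
            let r := max ((PySem.List.pyGet? v (Int.ofNat m)).getD 0 + p1.1) p2.1
            (r, p2.2.insert (Int.ofNat (m + 1), size1, size2) r)
        else
          let p1 := knapGo m (size1 - w) size2 s v memo
          let p2 := knapGo m size1 size2 s v p1.2
          let r := max ((PySem.List.pyGet? v (Int.ofNat m)).getD 0 + p1.1) p2.1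
          (r, p2.2.insert (Int.ofNat (m + 1), size1, size2) r)

def complexKnapsack_alt (i : Int) (size1 : Int) (size2 : Int) (s : List Int) (v : List Int) : Int :=
  (knapGo i.toNat size1 size2 s v PySem.Dict.empty).1

-- ===== PRECONDITION & SPEC =====
-- Outside 0 ≤ i ≤ len(s), i ≤ len(v), A raises IndexError/RecursionError except on corner inputs where no
-- item is ever examined (both capacities zero at the top, or every examined item fits in neither sack so the
-- missing v entries are never read); on those excluded corners A and B both return 0.
def Pre_complexKnapsack (i : Int) (size1 : Int) (size2 : Int) (s : List Int) (v : List Int) : Prop :=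
  0 ≤ i ∧ i ≤ s.length ∧ i ≤ v.length
instance (i : Int) (size1 : Int) (size2 : Int) (s : List Int) (v : List Int) : Decidable (Pre_complexKnapsack i size1 size2 s v) := by unfold Pre_complexKnapsack; infer_instance
def pvWitness_complexKnapsack : Int × Int × Int × List Int × List Int := (2, 5, 4, [3, 4], [10, 7])

def Spec_complexKnapsack (i : Int) (size1 : Int) (size2 : Int) (s : List Int) (v : List Int) (out : Int) : Prop := out = complexKnapsack_alt i size1 size2 s v
instance (i : Int) (size1 : Int) (size2 : Int) (s : List Int) (v : List Int) (out : Int) : Decidable (Spec_complexKnapsack i size1 size2 s v out) := by unfold Spec_complexKnapsack; infer_instance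

-- ===== CLAIM (what is proved, stated in full; the proofs are below) =====
def Claim_equal_complexKnapsack : Prop := ∀ (i : Int) (size1 : Int) (size2 : Int) (s : List Int) (v : List Int), Dom_complexKnapsack i size1 size2 s v → Pre_complexKnapsack i size1 size2 s v → Spec_complexKnapsack i size1 size2 s v (complexKnapsack i size1 size2 s v)

-- ===== LEMMAS AND PROOFS =====

-- memo invariant: every stored value is the plain (port-A) value of its state
def KnapInv (s v : List Int) (memo : PySem.Dict (Int × Int × Int) Int) : Prop :=
  ∀ (j a b r : Int), memo.get? (j, a, b) = some r → r = complexKnapsackAux j.toNat a b s v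

theorem knapGo_correct (s v : List Int) : ∀ (n : Nat) (size1 size2 : Int)
    (memo : PySem.Dict (Int × Int × Int) Int), KnapInv s v memo →
    (knapGo n size1 size2 s v memo).1 = complexKnapsackAux n size1 size2 s v ∧
    KnapInv s v (knapGo n size1 size2 s v memo).2 := by
  intro n
  induction n with
  | zero =>
    intro size1 size2 memo hInv
    have h0 : knapGo 0 size1 size2 s v memo = (0, memo) := by
      rw [knapGo]; split <;> rfl
    have a0 : complexKnapsackAux 0 size1 size2 s v = 0 := by
      rw [complexKnapsackAux]; split <;> rfl
    rw [h0, a0]; exact ⟨rfl, hInv⟩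
  | succ m ih =>
    intro size1 size2 memo hInv
    have hj : ((m : Int) + 1).toNat = m + 1 := by omega
    by_cases hz : size1 = 0 ∧ size2 = 0
    · have h0 : knapGo (m + 1) size1 size2 s v memo = (0, memo) := by
        rw [knapGo]; simp [hz]
      have a0 : complexKnapsackAux (m + 1) size1 size2 s v = 0 := by
        rw [complexKnapsackAux]; simp [hz]
      rw [h0, a0]; exact ⟨rfl, hInv⟩
    · rcases hget : memo.get? ((m : Int) + 1, size1, size2) with _ | r
      · -- not memoized yet: recompute, store
        by_cases h1 : ((s[m]?.getD 0 : Int)) > size1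
        · by_cases h2 : ((s[m]?.getD 0 : Int)) > size2
          · obtain ⟨e, I⟩ := ih size1 size2 memo hInv
            have hval : knapGo (m + 1) size1 size2 s v memo =
                ((knapGo m size1 size2 s v memo).1,
                 (knapGo m size1 size2 s v memo).2.insert ((m : Int) + 1, size1, size2)
                   (knapGo m size1 size2 s v memo).1) := by
              rw [knapGo]; simp [hz, hget, h1, h2]
            have haux : complexKnapsackAux (m + 1) size1 size2 s v =
                complexKnapsackAux m size1 size2 s v := by
              rw [complexKnapsackAux]; simp [hz, h1, h2]
            refine ⟨by rw [hval, haux]; exact e, ?_⟩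
            rw [hval]
            intro j a b r hr
            rw [PySem.Dict.get?_insert] at hr
            split at hr
            · rename_i heq
              rw [Prod.mk.injEq, Prod.mk.injEq] at heq
              obtain ⟨rfl, rfl, rfl⟩ := heq
              injection hr with hr
              rw [← hr, e, hj, haux]
            · exact I _ _ _ _ hr
          · obtain ⟨e1, I1⟩ := ih size1 (size2 - s[m]?.getD 0) memo hInv
            obtain ⟨e2, I2⟩ := ih size1 size2 _ I1
            have hval : knapGo (m + 1) size1 size2 s v memo =
                (max ((v[m]?.getD 0 : Int) + (knapGo m size1 (size2 - s[m]?.getD 0) s v memo).1)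
                     (knapGo m size1 size2 s v (knapGo m size1 (size2 - s[m]?.getD 0) s v memo).2).1,
                 (knapGo m size1 size2 s v (knapGo m size1 (size2 - s[m]?.getD 0) s v memo).2).2.insert
                   ((m : Int) + 1, size1, size2)
                   (max ((v[m]?.getD 0 : Int) + (knapGo m size1 (size2 - s[m]?.getD 0) s v memo).1)
                        (knapGo m size1 size2 s v (knapGo m size1 (size2 - s[m]?.getD 0) s v memo).2).1)) := by
              rw [knapGo]; simp [hz, hget, h1, h2]
            have haux : complexKnapsackAux (m + 1) size1 size2 s v =
                max ((v[m]?.getD 0 : Int) + complexKnapsackAux m size1 (size2 - s[m]?.getD 0) s v)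
                    (complexKnapsackAux m size1 size2 s v) := by
              rw [complexKnapsackAux]; simp [hz, h1, h2]
            refine ⟨by rw [hval, haux, e1, e2], ?_⟩
            rw [hval]
            intro j a b r hr
            rw [PySem.Dict.get?_insert] at hr
            split at hr
            · rename_i heq
              rw [Prod.mk.injEq, Prod.mk.injEq] at heq
              obtain ⟨rfl, rfl, rfl⟩ := heq
              injection hr with hr
              rw [← hr, e1, e2, hj, haux]
            · exact I2 _ _ _ _ hr
        · obtain ⟨e1, I1⟩ := ih (size1 - s[m]?.getD 0) size2 memo hInv
          obtain ⟨e2, I2⟩ := ih size1 size2 _ I1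
          have hval : knapGo (m + 1) size1 size2 s v memo =
              (max ((v[m]?.getD 0 : Int) + (knapGo m (size1 - s[m]?.getD 0) size2 s v memo).1)
                   (knapGo m size1 size2 s v (knapGo m (size1 - s[m]?.getD 0) size2 s v memo).2).1,
               (knapGo m size1 size2 s v (knapGo m (size1 - s[m]?.getD 0) size2 s v memo).2).2.insert
                 ((m : Int) + 1, size1, size2)
                 (max ((v[m]?.getD 0 : Int) + (knapGo m (size1 - s[m]?.getD 0) size2 s v memo).1)
                      (knapGo m size1 size2 s v (knapGo m (size1 - s[m]?.getD 0) size2 s v memo).2).1)) := by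
            rw [knapGo]; simp [hz, hget, h1]
          have haux : complexKnapsackAux (m + 1) size1 size2 s v =
              max ((v[m]?.getD 0 : Int) + complexKnapsackAux m (size1 - s[m]?.getD 0) size2 s v)
                  (complexKnapsackAux m size1 size2 s v) := by
            rw [complexKnapsackAux]; simp [hz, h1]
          refine ⟨by rw [hval, haux, e1, e2], ?_⟩
          rw [hval]
          intro j a b r hr
          rw [PySem.Dict.get?_insert] at hr
          split at hr
          · rename_i heq
            rw [Prod.mk.injEq, Prod.mk.injEq] at heq
            obtain ⟨rfl, rfl, rfl⟩ := heq
            injection hr with hr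
            rw [← hr, e1, e2, hj, haux]
          · exact I2 _ _ _ _ hr
      · -- memoized hit
        have hr := hInv _ _ _ _ hget
        have hval : knapGo (m + 1) size1 size2 s v memo = (r, memo) := by
          rw [knapGo]; simp [hz, hget]
        rw [hval, hr, hj]
        exact ⟨rfl, hInv⟩

-- ===== VERDICT (by name: the statement is the Claim_ definition above) =====
theorem complexKnapsack_spec : Claim_equal_complexKnapsack := by
  intro i size1 size2 s v _hDom _hPre
  unfold Spec_complexKnapsack complexKnapsack complexKnapsack_alt
  have h := knapGo_correct s v i.toNat size1 size2 PySem.Dict.empty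
    (by intro j a b r hr; simp [PySem.Dict.get?_empty] at hr)
  exact h.1.symm
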